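-- pv_equiv track=rewrite | github.com/Boyka89cid/Human-Activity-Recognition | Charades_Labelling/isPalRot.py | isPalRot
-- ===== SOURCE A (Python) =====
-- def palcheck(s,i,j):
--
--     while i < j:
--
--         if s[i] != s[j]:
--             return False
--         else:
--             i += 1
--             j -= 1
--
--     return True
--
-- def isPalRot(s):
--
--     i = 0
--     j = len(s)-1
--
--     if palcheck(s,i,j):
--         return True
--     else:
--
--         for x in range(j):
--             s1 = s[x+1:j+1]
--             s2 = s[0:x+1]
--
--             s1 += s2
--
--             if palcheck(s1,i,j):
--                 return True
--
--
--     return False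
-- ===== SOURCE B (Python) =====
-- def isPalRot(s):
--     # The rotation of s by k is a palindrome iff the reversal of s equals the
--     # rotation of s by 2k mod n; so some rotation is a palindrome iff the
--     # reversal occurs as a rotation at an even offset (at any offset when n is
--     # odd, since doubling is then a bijection mod n).
--     n = len(s)
--     if n == 0:
--         return True
--     r = s[::-1]
--     d = s + s
--     step = 1 if n % 2 == 1 else 2
--     return any(d[m:m+n] == r for m in range(0, n, step))
-- ===== Notes on version B (the rewrite author's own statement) =====
-- stated objective: faster
-- what changed: B never tests any rotation for palindromicity: using the identity that the rotation by k is a palindrome exactly when the reversal of s equals the rotation by 2k mod n, it matches the single fixed reversed string against rotations of s at even offsets (all offsets when n is odd), replacing A's per-character two-pointer palcheck over every hand-assembled rotation by C-level slice comparisons against one fixed string.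
import Mathlib
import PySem

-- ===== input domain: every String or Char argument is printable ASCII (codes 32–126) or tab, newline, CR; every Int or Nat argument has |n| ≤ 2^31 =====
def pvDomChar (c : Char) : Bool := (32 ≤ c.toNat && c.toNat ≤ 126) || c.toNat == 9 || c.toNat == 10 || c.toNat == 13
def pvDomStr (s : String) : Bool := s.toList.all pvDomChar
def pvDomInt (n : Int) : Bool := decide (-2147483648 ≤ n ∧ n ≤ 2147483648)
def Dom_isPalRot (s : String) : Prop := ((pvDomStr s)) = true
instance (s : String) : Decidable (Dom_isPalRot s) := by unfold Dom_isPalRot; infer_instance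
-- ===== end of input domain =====

-- B never tests a rotation for palindromicity: it matches the fixed string
-- reversed(s) against rotations of s at even offsets (all offsets when n is odd),
-- using 'rotation by k is a palindrome iff reversed(s) = rotation by 2k mod n'.

-- ===== PORT A =====
-- A's while-loop palcheck; recursion on the shrinking gap j - i.
-- The `none` branches correspond to a Python IndexError; unreachable for A's calls.
def pvPalcheck (t : List Char) (i j : Int) : Bool :=
  if i < j then
    match PySem.List.pyGet? t i, PySem.List.pyGet? t j with
    | some a, some b => if a ≠ b then false else pvPalcheck t (i + 1) (j - 1)
    | _, _ => false
  else true
termination_by (j - i).toNat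
decreasing_by omega

def isPalRot (s : String) : Bool :=
  let t := s.toList
  let i : Int := 0
  let j : Int := (t.length : Int) - 1
  if pvPalcheck t i j then true
  else
    (PySem.List.pyRange 0 j 1).any (fun x =>
      let s1 := PySem.List.slice t (some (x + 1)) (some (j + 1))
      let s2 := PySem.List.slice t (some 0) (some (x + 1))
      pvPalcheck (s1 ++ s2) i j)

-- ===== PORT B =====
def isPalRot_alt (s : String) : Bool :=
  let t := s.toList
  let n := t.length
  if n == 0 then true
  else
    let r := t.reverse            -- s[::-1]
    let d := t ++ t
    let step : Int := if n % 2 == 1 then 1 else 2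
    (PySem.List.pyRange 0 (n : Int) step).any (fun m =>
      PySem.List.slice d (some m) (some (m + (n : Int))) == r)

-- ===== PRECONDITION & SPEC =====
def Spec_isPalRot (s : String) (out : Bool) : Prop := out = isPalRot_alt s
instance (s : String) (out : Bool) : Decidable (Spec_isPalRot s out) := by unfold Spec_isPalRot; infer_instance

-- ===== CLAIM (what is proved, stated in full; the proofs are below) =====
def Claim_equal_isPalRot : Prop := ∀ (s : String), Dom_isPalRot s → Spec_isPalRot s (isPalRot s)

-- ===== LEMMAS AND PROOFS =====

-- left rotation by k (proof-side notion; neither port computes with it)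
def rotL (t : List Char) (k : Nat) : List Char := t.drop k ++ t.take k

lemma length_rotL (t : List Char) (k : Nat) : (rotL t k).length = t.length := by
  simp [rotL]; omega

lemma rotL_zero (t : List Char) : rotL t 0 = t := by simp [rotL]

-- composing two rotations
lemma rotL_rotL (t : List Char) (a b : Nat) (ha : a ≤ t.length) (hb : b < t.length) :
    rotL (rotL t a) b = rotL t ((a + b) % t.length) := by
  have hn : 0 < t.length := by omega
  unfold rotL
  by_cases hab : a + b ≤ t.length
  · have hd : ((t.drop a ++ t.take a).drop b) = t.drop (a + b) ++ t.take a := by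
      rw [List.drop_append_of_le_length (by simp; omega), List.drop_drop]
    have ht : ((t.drop a ++ t.take a).take b) = (t.drop a).take b := by
      rw [List.take_append_of_le_length (by simp; omega)]
    rw [hd, ht, List.append_assoc]
    by_cases he : a + b = t.length
    · have h0 : (a + b) % t.length = 0 := by rw [he, Nat.mod_self]
      rw [h0, he, List.drop_length, List.take_zero]
      have hall : (t.drop a).take b = t.drop a := by
        apply List.take_of_length_le; simp; omega
      simp [hall, List.take_append_drop]
    · have h0 : (a + b) % t.length = a + b := Nat.mod_eq_of_lt (by omega)
      rw [h0, List.take_add]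
  · -- a + b > n; the second rotation wraps, c = a + b - n
    have hc : (a + b) % t.length = a + b - t.length := by
      rw [Nat.mod_eq_sub_mod (by omega), Nat.mod_eq_of_lt (by omega)]
    rw [hc]
    set c := a + b - t.length with hcdef
    have hca : c ≤ a := by omega
    have hlen1 : (t.drop a).length = t.length - a := by simp
    have hd : ((t.drop a ++ t.take a).drop b) = (t.take a).drop c := by
      rw [List.drop_append, hlen1]
      have : b - (t.length - a) = c := by omega
      rw [this, List.drop_of_length_le (by simp; omega)]
      simp
    have ht : ((t.drop a ++ t.take a).take b) = t.drop a ++ (t.take a).take c := by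
      rw [List.take_append, hlen1]
      have : b - (t.length - a) = c := by omega
      rw [this, List.take_of_length_le (by simp; omega)]
    rw [hd, ht]
    have h1 : t.drop c = (t.take a).drop c ++ t.drop a := by
      conv_lhs => rw [← List.take_append_drop a t]
      rw [List.drop_append_of_le_length (by simp; omega)]
    have h2 : t.take c = (t.take a).take c := by
      rw [List.take_take, Nat.min_eq_left hca]
    rw [h1, h2, List.append_assoc]

-- the reverse of a rotation is a rotation of the reverse
lemma reverse_rotL (t : List Char) (k : Nat) (hk : k ≤ t.length) :
    (rotL t k).reverse = rotL t.reverse (t.length - k) := by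
  unfold rotL
  rw [List.reverse_append, List.drop_reverse, List.take_reverse]
  have h1 : t.length - (t.length - k) = k := by omega
  rw [h1]

-- core identity: rotation by k is a palindrome iff rotation by 2k mod n is the reverse
lemma pal_rot_iff (t : List Char) (k : Nat) (hk : k < t.length) :
    (rotL t k = (rotL t k).reverse) ↔ (rotL t ((2 * k) % t.length) = t.reverse) := by
  have hn : 0 < t.length := by omega
  rcases Nat.eq_zero_or_pos k with rfl | hk0
  · rw [rotL_zero, Nat.mul_zero, Nat.zero_mod, rotL_zero]
  · have hrev : t.reverse.length = t.length := by simp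
    rw [reverse_rotL t k (le_of_lt hk)]
    constructor
    · intro h
      have h2 := congrArg (fun u => rotL u k) h
      simp only [] at h2
      rw [rotL_rotL t k k (le_of_lt hk) hk] at h2
      have h3 : rotL (rotL t.reverse (t.length - k)) k
          = rotL t.reverse ((t.length - k + k) % t.reverse.length) := by
        rw [rotL_rotL t.reverse (t.length - k) k (by omega) (by omega)]
      rw [h3, hrev] at h2
      have h4 : (t.length - k + k) % t.length = 0 := by
        have : t.length - k + k = t.length := by omega
        rw [this, Nat.mod_self]
      rw [h4, rotL_zero] at h2
      have : 2 * k = k + k := by ring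
      rwa [this]
    · intro h
      set m := (2 * k) % t.length with hm
      have hmlt : m < t.length := Nat.mod_lt _ hn
      have h2 := congrArg (fun u => rotL u (t.length - k)) h
      simp only [] at h2
      rw [rotL_rotL t m (t.length - k) (le_of_lt hmlt) (by omega)] at h2
      have h4 : (m + (t.length - k)) % t.length = k := by
        rw [hm, Nat.mod_add_mod]
        have : 2 * k + (t.length - k) = k + t.length := by omega
        rw [this, Nat.add_mod_right, Nat.mod_eq_of_lt hk]
      rw [h4] at h2
      exact h2

-- the doubled list cut at k..k+n is the rotation by k
lemma double_rot (t : List Char) (k : Nat) (hk : k ≤ t.length) :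
    ((t ++ t).drop k).take t.length = rotL t k := by
  rw [List.drop_append_of_le_length hk]
  have hlen : (t.drop k).length = t.length - k := by simp
  rw [List.take_append, hlen]
  have h1 : (t.drop k).take t.length = t.drop k :=
    List.take_of_length_le (by omega)
  have h2 : t.length - (t.length - k) = k := by omega
  rw [h1, h2]; rfl

-- bridging the two existentials (doubling is onto the even residues; onto all when n is odd)
lemma exists_bridge (t : List Char) (hn : 0 < t.length) :
    (∃ k, k < t.length ∧ rotL t k = (rotL t k).reverse) ↔
      (∃ m, m < t.length ∧ (t.length % 2 = 1 ∨ m % 2 = 0) ∧ rotL t m = t.reverse) := by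
  constructor
  · rintro ⟨k, hk, hp⟩
    refine ⟨(2 * k) % t.length, Nat.mod_lt _ hn, ?_, (pal_rot_iff t k hk).mp hp⟩
    rcases Nat.mod_two_eq_zero_or_one t.length with he | ho
    · right
      obtain ⟨p, hp2⟩ : ∃ p, t.length = 2 * p := ⟨t.length / 2, by omega⟩
      rw [hp2, Nat.mul_mod_mul_left]
      omega
    · left; exact ho
  · rintro ⟨m, hm, hpar, hr⟩
    rcases Nat.eq_zero_or_pos (m % 2) with hme | hmo
    · -- m even: k = m / 2
      refine ⟨m / 2, by omega, (pal_rot_iff t (m / 2) (by omega)).mpr ?_⟩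
      have : 2 * (m / 2) = m := by omega
      rw [this, Nat.mod_eq_of_lt hm]; exact hr
    · -- m odd, so n odd: k = (m + n) / 2
      have ho : t.length % 2 = 1 := by rcases hpar with h | h; exact h; omega
      refine ⟨(m + t.length) / 2, by omega, (pal_rot_iff t ((m + t.length) / 2) (by omega)).mpr ?_⟩
      have h2 : 2 * ((m + t.length) / 2) = m + t.length := by omega
      rw [h2, Nat.add_mod_right, Nat.mod_eq_of_lt hm]; exact hr

-- A's two-pointer palcheck decides the mirror property on the window [i, j].
lemma palcheck_iff (t : List Char) :
    ∀ (d : ℕ) (i j : Int), (j + 1 - i).toNat ≤ d → 0 ≤ i → j < (t.length : Int) →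
      (pvPalcheck t i j = true ↔
        ∀ k : Int, i ≤ k → k ≤ j → t[k.toNat]? = t[(i + j - k).toNat]?) := by
  intro d
  induction d with
  | zero =>
      intro i j hd hi hj
      rw [pvPalcheck]
      simp only [if_neg (by omega : ¬ i < j)]
      constructor
      · intro _ k hk1 hk2; exfalso; omega
      · intro _; trivial
  | succ d ih =>
      intro i j hd hi hj
      by_cases hij : i < j
      · have hjn : j.toNat < t.length := by omega
        have hin : i.toNat < t.length := by omega
        have hgi : PySem.List.pyGet? t i = some t[i.toNat] :=
          PySem.List.pyGet?_eq_some_getElem t hi (by omega)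
        have hgj : PySem.List.pyGet? t j = some t[j.toNat] :=
          PySem.List.pyGet?_eq_some_getElem t (by omega) (by omega)
        rw [pvPalcheck]
        simp only [if_pos hij, hgi, hgj]
        have ihr := ih (i + 1) (j - 1) (by omega) (by omega) (by omega)
        by_cases hab : t[i.toNat] = t[j.toNat]
        · rw [if_neg (by simpa using hab)]
          rw [ihr]
          constructor
          · intro h k hk1 hk2
            by_cases hki : k = i
            · rw [hki]
              have heq : (i + j - i).toNat = j.toNat := by omega
              rw [heq]
              simp [hin, hjn, hab]
            · by_cases hkj : k = j
              · rw [hkj]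
                have heq : (i + j - j).toNat = i.toNat := by omega
                rw [heq]
                simp [hin, hjn, hab]
              · have hmid := h k (by omega) (by omega)
                have heq : (i + 1) + (j - 1) - k = i + j - k := by ring
                rw [heq] at hmid
                exact hmid
          · intro h k hk1 hk2
            have heq : (i + 1) + (j - 1) - k = i + j - k := by ring
            rw [heq]
            exact h k (by omega) (by omega)
        · rw [if_pos (by simpa using hab)]
          constructor
          · intro h; exact absurd h (by simp)
          · intro h
            exfalso
            apply hab
            have h0 := h i (le_refl i) (by omega)
            have heq : (i + j - i).toNat = j.toNat := by omega
            rw [heq] at h0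
            have h1 : some t[i.toNat] = some t[j.toNat] := by
              simpa [List.getElem?_eq_getElem, hin, hjn] using h0
            exact Option.some_injective _ h1
      · rw [pvPalcheck]
        simp only [if_neg hij]
        constructor
        · intro _ k hk1 hk2
          have hk : k = i ∧ i = j := by omega
          obtain ⟨rfl, rfl⟩ := hk
          congr 1
          omega
        · intro _; trivial

-- the mirror property on the full window [0, n-1] is reverse-equality
lemma mirror_iff_rev (t : List Char) :
    (∀ k : Int, 0 ≤ k → k ≤ (t.length : Int) - 1 →
        t[k.toNat]? = t[((0 : Int) + ((t.length : Int) - 1) - k).toNat]?) ↔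
      t = t.reverse := by
  constructor
  · intro h
    apply List.ext_getElem?
    intro m
    by_cases hm : m < t.length
    · rw [List.getElem?_reverse hm]
      have h0 := h m (by omega) (by omega)
      have heq : ((0 : Int) + ((t.length : Int) - 1) - m).toNat = t.length - 1 - m := by omega
      have hm' : ((m : Int)).toNat = m := by omega
      rw [heq, hm'] at h0
      exact h0
    · have h1 : t.length ≤ m := by omega
      rw [List.getElem?_eq_none h1, List.getElem?_eq_none (by simpa using h1)]
  · intro h k hk1 hk2
    have hkn : k.toNat < t.length := by omega
    have heq : ((0 : Int) + ((t.length : Int) - 1) - k).toNat = t.length - 1 - k.toNat := by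
      omega
    rw [heq]
    have h2 : t[t.length - 1 - k.toNat]? = t.reverse[t.length - 1 - k.toNat]? := by
      conv_rhs => rw [← h]
    rw [h2, List.getElem?_reverse (by omega)]
    congr 1
    omega

-- palcheck on a whole list with window [0, length-1] is reverse-equality
lemma palcheck_full (u : List Char) :
    pvPalcheck u 0 ((u.length : Int) - 1) = decide (u = u.reverse) := by
  rcases u with _ | ⟨a, v⟩
  · rw [pvPalcheck]; simp
  · set u := a :: v with hu
    have h1 : pvPalcheck u 0 ((u.length : Int) - 1) = true ↔ u = u.reverse := by
      rw [palcheck_iff u u.length 0 ((u.length : Int) - 1) (by omega) (by omega) (by omega)]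
      exact mirror_iff_rev u
    by_cases h : u = u.reverse
    · rw [h1.mpr h]
      exact (decide_eq_true h).symm
    · rcases Bool.eq_false_or_eq_true (pvPalcheck u 0 ((u.length : Int) - 1)) with h2 | h2
      · exact absurd (h1.mp h2) h
      · rw [h2, decide_eq_false h]

-- A's two slices glued together are the rotation by x+1
lemma rotA_slice (t : List Char) (x : Int) (hx0 : 0 ≤ x) (hx : x < (t.length : Int) - 1) :
    PySem.List.slice t (some (x + 1)) (some (((t.length : Int) - 1) + 1)) ++
        PySem.List.slice t (some 0) (some (x + 1)) =
      rotL t (x + 1).toNat := by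
  have h1 : ((t.length : Int) - 1) + 1 = (t.length : Int) := by ring
  rw [h1]
  rw [PySem.List.slice_toNat t (by omega) (by omega)]
  rw [PySem.List.slice_toNat t (by omega) (by omega)]
  have e1 : List.take (((t.length : Int)).toNat - (x + 1).toNat) (List.drop (x + 1).toNat t)
      = List.drop (x + 1).toNat t := by
    apply List.take_of_length_le
    rw [List.length_drop]
    omega
  rw [e1]
  simp [rotL]

-- A's body decides: some rotation is a palindrome
lemma A_iff (t : List Char) (hn : 0 < t.length) :
    ((if pvPalcheck t 0 ((t.length : Int) - 1) then true
      else
        (PySem.List.pyRange 0 ((t.length : Int) - 1) 1).any (fun x =>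
          pvPalcheck
            (PySem.List.slice t (some (x + 1)) (some (((t.length : Int) - 1) + 1)) ++
              PySem.List.slice t (some 0) (some (x + 1))) 0 ((t.length : Int) - 1))) = true)
      ↔ ∃ k, k < t.length ∧ rotL t k = (rotL t k).reverse := by
  split_ifs with h
  · simp only [true_iff]
    refine ⟨0, hn, ?_⟩
    rw [rotL_zero]
    rw [palcheck_full] at h
    exact of_decide_eq_true h
  · rw [List.any_eq_true]
    constructor
    · rintro ⟨x, hx, hp⟩
      rw [PySem.List.mem_pyRange_one] at hx
      rw [rotA_slice t x hx.1 hx.2] at hp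
      refine ⟨(x + 1).toNat, by omega, ?_⟩
      have hl : ((t.length : Int) - 1) = ((rotL t (x + 1).toNat).length : Int) - 1 := by
        rw [length_rotL]
      rw [hl, palcheck_full] at hp
      exact of_decide_eq_true hp
    · rintro ⟨k, hk, hp⟩
      have hk0 : k ≠ 0 := by
        intro h0
        rw [h0, rotL_zero] at hp
        rw [palcheck_full] at h
        exact h (decide_eq_true hp)
      refine ⟨(k : Int) - 1, ?_, ?_⟩
      · rw [PySem.List.mem_pyRange_one]; omega
      · have hx0 : (0 : Int) ≤ (k : Int) - 1 := by omega
        have hx : (k : Int) - 1 < (t.length : Int) - 1 := by omega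
        rw [rotA_slice t ((k : Int) - 1) hx0 hx]
        have ht : ((k : Int) - 1 + 1).toNat = k := by omega
        rw [ht]
        have hl : ((t.length : Int) - 1) = ((rotL t k).length : Int) - 1 := by
          rw [length_rotL]
        rw [hl, palcheck_full]
        exact decide_eq_true hp

-- B's body decides: the reverse appears at an admissible offset
lemma B_iff (t : List Char) (hn : 0 < t.length) :
    ((PySem.List.pyRange 0 (t.length : Int) (if t.length % 2 == 1 then 1 else 2)).any
        (fun m => PySem.List.slice (t ++ t) (some m) (some (m + (t.length : Int))) ==
          t.reverse) = true)
      ↔ ∃ m, m < t.length ∧ (t.length % 2 = 1 ∨ m % 2 = 0) ∧ rotL t m = t.reverse := by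
  have hstep : (0 : Int) < (if t.length % 2 == 1 then 1 else 2) := by split <;> omega
  rw [List.any_eq_true]
  constructor
  · rintro ⟨m, hm, hp⟩
    rw [PySem.List.mem_pyRange_iff_of_pos hstep] at hm
    obtain ⟨hm0, hmn, hdvd⟩ := hm
    refine ⟨m.toNat, by omega, ?_, ?_⟩
    · rcases Nat.mod_two_eq_zero_or_one t.length with he | ho
      · right
        rw [show (if t.length % 2 == 1 then (1:Int) else 2) = 2 by simp [he]] at hdvd
        omega
      · left; exact ho
    · rw [PySem.List.slice_toNat (t ++ t) hm0 (by omega)] at hp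
      have harg : (m + (t.length : Int)).toNat - m.toNat = t.length := by omega
      rw [harg, double_rot t m.toNat (by omega)] at hp
      exact (beq_iff_eq).mp hp
  · rintro ⟨m, hm, hpar, hr⟩
    refine ⟨(m : Int), ?_, ?_⟩
    · rw [PySem.List.mem_pyRange_iff_of_pos hstep]
      refine ⟨by omega, by omega, ?_⟩
      rcases Nat.mod_two_eq_zero_or_one t.length with he | ho
      · rw [show (if t.length % 2 == 1 then (1:Int) else 2) = 2 by simp [he]]
        have hme : m % 2 = 0 := by rcases hpar with h | h; omega; exact h
        omega
      · rw [show (if t.length % 2 == 1 then (1:Int) else 2) = 1 by simp [ho]]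
        omega
    · rw [PySem.List.slice_toNat (t ++ t) (by omega) (by omega)]
      have harg : ((m : Int) + (t.length : Int)).toNat - ((m : Int)).toNat = t.length := by
        omega
      have hm' : ((m : Int)).toNat = m := by omega
      rw [harg, hm', double_rot t m (by omega)]
      exact (beq_iff_eq).mpr hr

-- ===== VERDICT (by name: the statement is the Claim_ definition above) =====
theorem isPalRot_spec : Claim_equal_isPalRot := by
  intro s _
  unfold Spec_isPalRot isPalRot isPalRot_alt
  simp only []
  rcases Nat.eq_zero_or_pos s.toList.length with hn | hn
  · have ht : s.toList = [] := List.eq_nil_of_length_eq_zero hn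
    rw [ht]
    rw [pvPalcheck]
    simp
  · have h0 : (s.toList.length == 0) = false := by
      simp only [beq_eq_false_iff_ne, ne_eq]
      omega
    simp only [h0, Bool.false_eq_true, if_false]
    rw [Bool.eq_iff_iff, A_iff s.toList hn, B_iff s.toList hn]
    exact exists_bridge s.toList hn
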